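-- pv_equiv track=rewrite | github.com/mursrira/leetcode_fulltimes | curiousity/merge_10_nums.py | mergeNums
-- ===== SOURCE A (Python) =====
-- def mergeNums( nums ):
--
--     res = nums[0]
--     i = 1
--     for num in nums[1:]:
--         left_shift = 3*i
--         num = num << left_shift
--         i += 1
--         res = res | num
--
--     return res
-- ===== SOURCE B (Python) =====
-- def mergeNums(nums):
--     # Horner's method, most-significant element first: start from the last
--     # element and fold right-to-left, shifting the accumulator 3 bits per step.
--     res = nums[-1]
--     for num in reversed(nums[:-1]):
--         res = (res << 3) | num
--     return res
-- ===== Notes on version B (the rewrite author's own statement) =====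
-- stated objective: alternative
-- what changed: Replaces the left-to-right loop that shifts each element by a growing offset 3*i and ORs it into the accumulator with Horner's method: start from the last element and fold right-to-left doing res = (res << 3) | num, so no per-element shift offset is maintained.
import Mathlib
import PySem

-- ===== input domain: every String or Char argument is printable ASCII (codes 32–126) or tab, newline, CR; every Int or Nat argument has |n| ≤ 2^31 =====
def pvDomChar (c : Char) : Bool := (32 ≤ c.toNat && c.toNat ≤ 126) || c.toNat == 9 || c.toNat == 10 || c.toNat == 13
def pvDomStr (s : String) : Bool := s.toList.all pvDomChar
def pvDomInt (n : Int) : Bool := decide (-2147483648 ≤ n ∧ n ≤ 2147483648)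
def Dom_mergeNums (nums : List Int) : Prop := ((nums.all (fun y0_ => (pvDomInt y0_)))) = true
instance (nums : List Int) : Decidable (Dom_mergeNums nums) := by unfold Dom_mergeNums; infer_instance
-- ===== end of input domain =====

-- B packs the integers by Horner's method (fold right-to-left, shifting the accumulator
-- 3 bits per step) instead of A's left-to-right loop shifting each element by 3*i.

-- ===== PORT A =====
-- A's loop: res = res | (num << 3*i); i += 1.  i starts at 1 and only grows, so the
-- Python shift amount 3*i is nonnegative and `<<< (3*i : Nat)` is exact.
def mergeNumsLoop (l : List Int) (res : Int) (i : Nat) : Int :=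
  match l with
  | [] => res
  | num :: rest => mergeNumsLoop rest (PySem.Int.bor res (num <<< (3 * i))) (i + 1)

def mergeNums (nums : List Int) : Int :=
  match PySem.List.pyGet? nums 0 with
  | none => 0   -- Python raises IndexError on nums[0]; excluded by Pre_
  | some r => mergeNumsLoop (PySem.List.slice nums (some 1) none) r 1

-- ===== PORT B =====
def mergeNums_alt (nums : List Int) : Int :=
  match PySem.List.pyGet? nums (-1) with
  | none => 0   -- Python raises IndexError on nums[-1]; excluded by Pre_
  | some r =>
      ((PySem.List.slice nums none (some (-1))).reverse).foldl
        (fun res num => PySem.Int.bor (res <<< (3:Nat)) num) r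

-- ===== PRECONDITION & SPEC =====
-- Python A raises IndexError on the empty list (nums[0]); so does B (nums[-1]).
def Pre_mergeNums (nums : List Int) : Prop := nums ≠ []
instance (nums : List Int) : Decidable (Pre_mergeNums nums) := by unfold Pre_mergeNums; infer_instance
def pvWitness_mergeNums : List Int := ([1, 2, 3] : List Int)

def Spec_mergeNums (nums : List Int) (out : Int) : Prop := out = mergeNums_alt nums
instance (nums : List Int) (out : Int) : Decidable (Spec_mergeNums nums out) := by unfold Spec_mergeNums; infer_instance

-- ===== CLAIM (what is proved, stated in full; the proofs are below) =====
def Claim_equal_mergeNums : Prop := ∀ (nums : List Int), Dom_mergeNums nums → Pre_mergeNums nums → Spec_mergeNums nums (mergeNums nums)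

-- ===== LEMMAS AND PROOFS =====

-- bitwise facts about Python's `|` (PySem.Int.bor) and `<<`, needed to relate the two loops
theorem pvAndAddLdiff : ∀ n m : Nat, (n &&& m) + Nat.ldiff n m = n := by
  intro n
  induction n using Nat.strong_induction_on with
  | _ n ih =>
    intro m
    match n with
    | 0 => simp [Nat.zero_and, Nat.ldiff]
    | Nat.succ k =>
      show ((k+1) &&& m) + Nat.ldiff (k+1) m = k+1
      have ha : ((k+1) &&& m) / 2 = (k+1)/2 &&& m/2 := Nat.and_div_two
      have hl : Nat.ldiff (k+1) m / 2 = Nat.ldiff ((k+1)/2) (m/2) := by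
        have := Nat.bitwise_div_two_pow (f := fun a b => a && !b) (x := k+1) (y := m) (n := 1)
        simpa [Nat.ldiff, Nat.pow_one] using this
      have ihh := ih ((k+1)/2) (by omega) (m/2)
      have hamod : ((k+1) &&& m) % 2 = (k+1) % 2 &&& m % 2 := by
        have := Nat.and_mod_two_pow (a := k+1) (b := m) (n := 1); simpa using this
      have hlmod : Nat.ldiff (k+1) m % 2 = Nat.ldiff ((k+1)%2) (m%2) := by
        have := Nat.bitwise_mod_two_pow (f := fun a b => a && !b) (x := k+1) (y := m) (n := 1)
        simpa [Nat.ldiff, Nat.pow_one] using this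
      rcases Nat.mod_two_eq_zero_or_one (k+1) with h1 | h1 <;>
        rcases Nat.mod_two_eq_zero_or_one m with hm | hm <;>
        rw [h1, hm] at hamod hlmod <;>
        simp only [show (0 &&& 0 : Nat) = 0 by decide, show (0 &&& 1 : Nat) = 0 by decide,
          show (1 &&& 0 : Nat) = 0 by decide, show (1 &&& 1 : Nat) = 1 by decide,
          show Nat.ldiff 0 0 = 0 by simp [Nat.ldiff, Nat.bitwise], show Nat.ldiff 0 1 = 0 by simp [Nat.ldiff, Nat.bitwise],
          show Nat.ldiff 1 0 = 1 by simp [Nat.ldiff, Nat.bitwise], show Nat.ldiff 1 1 = 0 by simp [Nat.ldiff, Nat.bitwise]] at hamod hlmod <;>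
        omega

theorem pvSubAndEqLdiff (n m : Nat) : n - (n &&& m) = Nat.ldiff n m := by
  have h := pvAndAddLdiff n m
  omega

theorem pvBorEqLor (a b : Int) : PySem.Int.bor a b = Int.lor a b := by
  match a, b with
  | Int.ofNat m, Int.ofNat n =>
      simp [PySem.Int.bor, Int.lor, Int.toNat]
  | Int.ofNat m, Int.negSucc n =>
      simp [PySem.Int.bor, Int.lor, pvSubAndEqLdiff, Int.negSucc_eq]
      omega
  | Int.negSucc m, Int.ofNat n =>
      simp [PySem.Int.bor, Int.lor, pvSubAndEqLdiff, Int.negSucc_eq]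
      omega
  | Int.negSucc m, Int.negSucc n =>
      simp [PySem.Int.bor, Int.lor, Int.negSucc_eq]
      omega

theorem pvIntExt {a b : Int} (h : ∀ i, a.testBit i = b.testBit i) : a = b := by
  match a, b with
  | Int.ofNat m, Int.ofNat n =>
      exact congrArg Int.ofNat (Nat.eq_of_testBit_eq fun i => h i)
  | Int.negSucc m, Int.negSucc n =>
      have : m = n := Nat.eq_of_testBit_eq fun i => by
        have hi := h i
        simp [Int.testBit] at hi
        exact hi
      exact congrArg Int.negSucc this
  | Int.ofNat m, Int.negSucc n =>
      exfalso
      have hm : m < 2 ^ (m + n) := lt_of_lt_of_le Nat.lt_two_pow_self (Nat.pow_le_pow_right (by omega) (by omega))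
      have hn : n < 2 ^ (m + n) := lt_of_lt_of_le Nat.lt_two_pow_self (Nat.pow_le_pow_right (by omega) (by omega))
      have := h (m + n)
      simp [Int.testBit, Nat.testBit_lt_two_pow hm, Nat.testBit_lt_two_pow hn] at this
  | Int.negSucc m, Int.ofNat n =>
      exfalso
      have hm : m < 2 ^ (m + n) := lt_of_lt_of_le Nat.lt_two_pow_self (Nat.pow_le_pow_right (by omega) (by omega))
      have hn : n < 2 ^ (m + n) := lt_of_lt_of_le Nat.lt_two_pow_self (Nat.pow_le_pow_right (by omega) (by omega))
      have := h (m + n)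
      simp [Int.testBit, Nat.testBit_lt_two_pow hm, Nat.testBit_lt_two_pow hn] at this

theorem pvTestBitShiftLeft (a : Int) (n i : Nat) :
    (a <<< n).testBit i = (decide (n ≤ i) && a.testBit (i - n)) := by
  match a with
  | Int.ofNat m =>
      show (Int.ofNat (m <<< n)).testBit i = _
      simp [Int.testBit, Nat.testBit_shiftLeft, ge_iff_le]
  | Int.negSucc m =>
      show (Int.negSucc ((m + 1) <<< n - 1)).testBit i = _
      have hpos : 0 < 2 ^ n := Nat.two_pow_pos n
      have heq : (m + 1) <<< n - 1 = 2 ^ n * m + (2 ^ n - 1) := by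
        rw [Nat.shiftLeft_eq]; ring_nf; omega
      rw [heq]
      have htb := Nat.testBit_two_pow_mul_add m (b := 2 ^ n - 1) (i := n) (by omega) i
      simp only [Int.testBit, htb, Nat.testBit_two_pow_sub_one]
      by_cases hni : i < n
      · simp [hni, show ¬ n ≤ i by omega]
      · simp [hni, show n ≤ i by omega]

theorem pvTestBitBor (a b : Int) (i : Nat) :
    (PySem.Int.bor a b).testBit i = (a.testBit i || b.testBit i) := by
  rw [pvBorEqLor]; exact Int.testBit_lor a b i

theorem pvBorAssoc (a b c : Int) :
    PySem.Int.bor (PySem.Int.bor a b) c = PySem.Int.bor a (PySem.Int.bor b c) := by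
  apply pvIntExt; intro i
  simp [pvTestBitBor, Bool.or_assoc]

theorem pvBorShift (a b : Int) (n : Nat) :
    (PySem.Int.bor a b) <<< n = PySem.Int.bor (a <<< n) (b <<< n) := by
  apply pvIntExt; intro i
  simp only [pvTestBitShiftLeft, pvTestBitBor]
  by_cases h : n ≤ i <;> simp [h]

-- the common value: pack [x0, …, xk] = x0 | (pack [x1, …, xk] << 3)
def pvPack : List Int → Int
  | [] => 0
  | x :: xs => PySem.Int.bor x (pvPack xs <<< (3:Nat))

theorem pvALoop (l : List Int) : ∀ (res : Int) (i : Nat),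
    mergeNumsLoop l res i = PySem.Int.bor res (pvPack l <<< (3 * i)) := by
  induction l with
  | nil => intro res i; simp [mergeNumsLoop, pvPack, PySem.Int.bor_zero]
  | cons x xs ih =>
      intro res i
      rw [mergeNumsLoop, ih, pvPack, pvBorShift, ← Int.shiftLeft_add, pvBorAssoc]
      have : 3 + 3 * i = 3 * (i + 1) := by ring
      rw [this]

theorem pvBLoop (m : List Int) : ∀ (acc : Int),
    (m.reverse).foldl (fun res num => PySem.Int.bor (res <<< (3:Nat)) num) acc
      = pvPack (m ++ [acc]) := by
  induction m with
  | nil => intro acc; simp [pvPack, PySem.Int.bor_zero]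
  | cons x xs ih =>
      intro acc
      simp only [List.reverse_cons, List.foldl_append, List.foldl_cons, List.foldl_nil, ih]
      rw [List.cons_append, pvPack, PySem.Int.bor_comm]

-- ===== VERDICT (by name: the statement is the Claim_ definition above) =====
theorem mergeNums_spec : Claim_equal_mergeNums := by
  intro nums _ hpre
  unfold Spec_mergeNums mergeNums mergeNums_alt
  match hn : nums with
  | [] => exact absurd rfl hpre
  | h :: t =>
      rw [PySem.List.pyGet?_zero_cons, PySem.List.pyGet?_neg_one,
        PySem.List.slice_from_one, PySem.List.slice_to_neg_one]
      have hne : h :: t ≠ [] := by simp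
      rw [List.getLast?_eq_some_getLast hne]
      simp only [List.tail_cons]
      rw [pvBLoop, List.dropLast_append_getLast hne]
      rw [pvALoop]
      rw [pvPack, mul_one]
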